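-- pv_equiv track=rewrite | github.com/zenml-io/zenml | tools/reflow_docs.py | reflow
-- ===== SOURCE A (Python) =====
-- def reflow(text):
--     out = []
--     buf = []
--     in_code = False
--
--     def flush():
--         if buf:
--             out.append(" ".join(line.strip() for line in buf))
--             buf.clear()
--
--     for line in text.splitlines():
--         if line.strip().startswith("```"):
--             flush()
--             in_code = not in_code
--             out.append(line)
--             continue
--
--         if in_code:
--             out.append(line)
--             continue
--
--         # keep headers, lists, tables, empty lines
--         if (
--             line.strip() == ""
--             or line.lstrip().startswith(("#", "-", "*", ">", "|"))
--         ):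
--             flush()
--             out.append(line)
--             continue
--
--         # otherwise, part of a paragraph
--         buf.append(line)
--
--     flush()
--     return "\n".join(out) + "\n"
-- ===== SOURCE B (Python) =====
-- def _is_special(line):
--     return line.strip() == "" or line.lstrip().startswith(("#", "-", "*", ">", "|"))
--
--
-- def _prose(seg):
--     # reflow one prose segment: special lines verbatim, maximal runs of
--     # plain lines joined into one stripped paragraph line
--     out = []
--     i = 0
--     while i < len(seg):
--         line = seg[i]
--         if _is_special(line):
--             out.append(line)
--             i += 1
--         else:
--             j = i + 1
--             while j < len(seg) and not _is_special(seg[j]):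
--                 j += 1
--             out.append(" ".join(l.strip() for l in seg[i:j]))
--             i = j
--     return out
--
--
-- def reflow(text):
--     # phase 1: partition the lines into segments separated by fence lines
--     segs = []
--     cur = []
--     in_code = False
--     for line in text.splitlines():
--         if line.strip().startswith("```"):
--             segs.append((in_code, cur, line))
--             cur = []
--             in_code = not in_code
--         else:
--             cur.append(line)
--     segs.append((in_code, cur, None))
--     # phase 2: code segments verbatim, prose segments reflowed
--     out = []
--     for is_code, seg, fence in segs:
--         out.extend(seg if is_code else _prose(seg))
--         if fence is not None:
--             out.append(fence)
--     return "\n".join(out) + "\n"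
-- ===== Notes on version B (the rewrite author's own statement) =====
-- stated objective: alternative
-- what changed: B replaces A's single online pass with mutable flush/buffer state by a two-phase pipeline: first partition the lines into fence-separated segments, then emit code segments verbatim and reflow each prose segment by gathering maximal runs of plain lines with an index loop.
import Mathlib
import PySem

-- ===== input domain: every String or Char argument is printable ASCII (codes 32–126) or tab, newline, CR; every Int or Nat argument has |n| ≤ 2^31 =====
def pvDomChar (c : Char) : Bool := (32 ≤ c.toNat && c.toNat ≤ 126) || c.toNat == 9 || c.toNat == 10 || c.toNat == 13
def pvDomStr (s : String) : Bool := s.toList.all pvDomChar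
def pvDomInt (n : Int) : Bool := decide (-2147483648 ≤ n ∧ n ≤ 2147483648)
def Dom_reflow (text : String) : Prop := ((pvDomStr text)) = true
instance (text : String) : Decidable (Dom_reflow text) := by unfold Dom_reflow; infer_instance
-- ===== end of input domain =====

-- B is an alternative decomposition of A (same cost): a fence-partition phase followed by a
-- per-prose-segment run-gathering phase, instead of A's single pass with a pending buffer.

-- shared predicates (the same tests both Pythons perform)
def isFence (line : String) : Bool := PySem.Str.startswith (PySem.Str.strip line) "```"

def isSpecial (line : String) : Bool :=
  (PySem.Str.strip line == "") || PySem.Str.startswith (PySem.Str.lstrip line) "#"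
    || PySem.Str.startswith (PySem.Str.lstrip line) "-" || PySem.Str.startswith (PySem.Str.lstrip line) "*"
    || PySem.Str.startswith (PySem.Str.lstrip line) ">" || PySem.Str.startswith (PySem.Str.lstrip line) "|"

-- ===== PORT A =====
-- flush(): append the joined stripped buffer if non-empty
def flushA (out buf : List String) : List String :=
  if buf.isEmpty then out else out ++ [PySem.Str.join " " (buf.map PySem.Str.strip)]

def stepA (st : List String × List String × Bool) (line : String) :
    List String × List String × Bool :=
  if isFence line then
    (flushA st.1 st.2.1 ++ [line], [], !st.2.2)
  else if st.2.2 then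
    (st.1 ++ [line], st.2.1, st.2.2)
  else if isSpecial line then
    (flushA st.1 st.2.1 ++ [line], [], st.2.2)
  else
    (st.1, st.2.1 ++ [line], st.2.2)

def reflow (text : String) : String :=
  let fin := (PySem.Str.splitlines text).foldl stepA ([], [], false)
  PySem.Str.join "\n" (flushA fin.1 fin.2.1) ++ "\n"

-- ===== PORT B =====
-- inner while loop of _prose: maximal run of plain lines and the remainder
def takeRun : List String → List String × List String
  | [] => ([], [])
  | l :: ls =>
    if isSpecial l then ([], l :: ls)
    else
      let p := takeRun ls
      (l :: p.1, p.2)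

theorem takeRun_rest_length (ls : List String) : (takeRun ls).2.length ≤ ls.length := by
  induction ls with
  | nil => simp [takeRun]
  | cons l ls ih =>
    simp only [takeRun]
    split
    · simp
    · simpa using Nat.le_succ_of_le ih

-- _prose: special lines verbatim, maximal plain runs joined
def proseOut : List String → List String
  | [] => []
  | l :: ls =>
    if isSpecial l then l :: proseOut ls
    else
      let p := takeRun ls
      PySem.Str.join " " ((l :: p.1).map PySem.Str.strip) :: proseOut p.2
termination_by ls => ls.length
decreasing_by
  all_goals (have := takeRun_rest_length ls; simp; try omega)

-- phase 1 step: collect fence-separated segments (segs, cur, in_code)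
def segsStepB (st : List (Bool × List String × Option String) × List String × Bool)
    (line : String) : List (Bool × List String × Option String) × List String × Bool :=
  if isFence line then
    (st.1 ++ [(st.2.2, st.2.1, some line)], [], !st.2.2)
  else
    (st.1, st.2.1 ++ [line], st.2.2)

-- phase 2 step: code verbatim / prose reflowed, then the fence line
def outStepB (acc : List String) (s : Bool × List String × Option String) : List String :=
  (acc ++ (if s.1 then s.2.1 else proseOut s.2.1)) ++
    (match s.2.2 with | some f => [f] | none => [])

def reflow_alt (text : String) : String :=
  let fin := (PySem.Str.splitlines text).foldl segsStepB ([], [], false)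
  let segs := fin.1 ++ [(fin.2.2, fin.2.1, (none : Option String))]
  PySem.Str.join "\n" (segs.foldl outStepB []) ++ "\n"

-- ===== PRECONDITION & SPEC =====
def Spec_reflow (text : String) (out : String) : Prop := out = reflow_alt text
instance (text : String) (out : String) : Decidable (Spec_reflow text out) := by unfold Spec_reflow; infer_instance

-- ===== CLAIM (what is proved, stated in full; the proofs are below) =====
def Claim_equal_reflow : Prop := ∀ (text : String), Dom_reflow text → Spec_reflow text (reflow text)

-- ===== LEMMAS AND PROOFS =====

-- the pending-paragraph buffer, flushed: what A appends for buf
def flushList (buf : List String) : List String :=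
  if buf.isEmpty then [] else [PySem.Str.join " " (buf.map PySem.Str.strip)]

theorem flushA_eq (out buf : List String) : flushA out buf = out ++ flushList buf := by
  unfold flushA flushList; split <;> simp

-- reference recursion: the remaining output lines from pending buffer buf and flag ic
def RR : List String → List String → Bool → List String
  | [], buf, _ => flushList buf
  | l :: ls, buf, ic =>
    if isFence l then flushList buf ++ l :: RR ls [] (!ic)
    else if ic then l :: RR ls buf ic
    else if isSpecial l then flushList buf ++ l :: RR ls [] ic
    else RR ls (buf ++ [l]) ic

-- ===== A-side: the fold computes out ++ RR =====
theorem foldA_eq (lines : List String) : ∀ (out buf : List String) (ic : Bool),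
    (let fin := lines.foldl stepA (out, buf, ic); flushA fin.1 fin.2.1)
      = out ++ RR lines buf ic := by
  induction lines with
  | nil => intro out buf ic; simpa [RR] using flushA_eq out buf
  | cons l ls ih =>
    intro out buf ic
    simp only [List.foldl_cons, stepA, RR]
    by_cases hf : isFence l
    · simp [hf, ih, flushA_eq, flushList]
    · by_cases hic : ic
      · simp [hf, hic, ih]
      · by_cases hs : isSpecial l
        · simp [hf, hic, hs, ih, flushA_eq, flushList]
        · simp [hf, hic, hs, ih]

-- ===== B-side =====
-- segment list produced from pending cur and flag ic (phase 1, with the final segment)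
def Slist : List String → List String → Bool → List (Bool × List String × Option String)
  | [], cur, ic => [(ic, cur, none)]
  | l :: ls, cur, ic =>
    if isFence l then (ic, cur, some l) :: Slist ls [] (!ic)
    else Slist ls (cur ++ [l]) ic

theorem foldSegs_eq (lines : List String) :
    ∀ (segs : List (Bool × List String × Option String)) (cur : List String) (ic : Bool),
    (let fin := lines.foldl segsStepB (segs, cur, ic);
      fin.1 ++ [(fin.2.2, fin.2.1, (none : Option String))]) = segs ++ Slist lines cur ic := by
  induction lines with
  | nil => intro segs cur ic; simp [Slist]
  | cons l ls ih =>
    intro segs cur ic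
    simp only [List.foldl_cons, segsStepB, Slist]
    by_cases hf : isFence l
    · simp [hf, ih]
    · simp [hf, ih]

def emitSeg (s : Bool × List String × Option String) : List String :=
  (if s.1 then s.2.1 else proseOut s.2.1) ++ (match s.2.2 with | some f => [f] | none => [])

theorem foldOut_eq (segs : List (Bool × List String × Option String)) :
    ∀ acc, segs.foldl outStepB acc = acc ++ segs.flatMap emitSeg := by
  induction segs with
  | nil => intro acc; simp
  | cons s t ih => intro acc; simp [outStepB, ih, emitSeg]

-- ===== proseOut facts =====
def allPlain (buf : List String) : Prop := ∀ l ∈ buf, isSpecial l = false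

def closed (done : List String) : Prop := ∀ x, done.getLast? = some x → isSpecial x = true

theorem takeRun_decomp (ls : List String) : ls = (takeRun ls).1 ++ (takeRun ls).2 := by
  induction ls with
  | nil => simp [takeRun]
  | cons l t ih =>
    simp only [takeRun]
    split
    · simp
    · simpa using ih

theorem takeRun_plain_append (buf : List String) (h : allPlain buf) (rest : List String) :
    takeRun (buf ++ rest) = (buf ++ (takeRun rest).1, (takeRun rest).2) := by
  induction buf with
  | nil => simp
  | cons b t ih =>
    have hb : isSpecial b = false := h b (by simp)
    simp only [List.cons_append, takeRun, hb]
    simp [ih (fun l hl => h l (by simp [hl]))]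

theorem takeRun_all_plain (buf : List String) (h : allPlain buf) : takeRun buf = (buf, []) := by
  simpa [takeRun] using takeRun_plain_append buf h []

theorem takeRun_special_append (ds : List String)
    (h : ∃ x ∈ ds, isSpecial x = true) (rest : List String) :
    takeRun (ds ++ rest) = ((takeRun ds).1, (takeRun ds).2 ++ rest) ∧ (takeRun ds).2 ≠ [] := by
  induction ds with
  | nil => simp at h
  | cons d t ih =>
    by_cases hd : isSpecial d
    · simp [takeRun, hd]
    · obtain ⟨x, hx, hxs⟩ := h
      rcases List.mem_cons.1 hx with hx | hx
      · exact absurd (hx ▸ hxs) (by simp [hd])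
      · obtain ⟨h1, h2⟩ := ih ⟨x, hx, hxs⟩
        simp [takeRun, hd, h1, h2]

theorem proseOut_plain (buf : List String) (h : allPlain buf) :
    proseOut buf = flushList buf := by
  cases buf with
  | nil => simp [proseOut, flushList]
  | cons b t =>
    have hb : isSpecial b = false := h b (by simp)
    have ht : takeRun t = (t, []) := takeRun_all_plain t (fun l hl => h l (by simp [hl]))
    simp only [proseOut, hb]
    simp [ht, flushList, proseOut]

theorem proseOut_plain_special (buf : List String) (h : allPlain buf)
    (l : String) (hl : isSpecial l = true) (rest : List String) :
    proseOut (buf ++ l :: rest) = flushList buf ++ l :: proseOut rest := by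
  cases buf with
  | nil => simp [proseOut, hl, flushList]
  | cons b t =>
    have hb : isSpecial b = false := h b (by simp)
    have ht := takeRun_plain_append t (fun x hx => h x (by simp [hx])) (l :: rest)
    simp only [List.cons_append, proseOut, hb]
    simp [ht, takeRun, hl, flushList, proseOut]

theorem closed_getLast_mem (ds : List String) (hne : ds ≠ []) (h : closed ds) :
    ∃ x ∈ ds, isSpecial x = true := by
  cases hx : ds.getLast? with
  | none => exact absurd (List.getLast?_eq_none_iff.1 hx) hne
  | some x =>
    refine ⟨x, ?_, h x hx⟩
    obtain ⟨hne', heq⟩ := List.mem_getLast?_eq_getLast (l := ds) (by rw [hx]; rfl)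
    rw [heq]
    exact List.getLast_mem _

theorem getLast?_cons_ne_nil (l : String) (ds : List String) (hne : ds ≠ []) :
    (l :: ds).getLast? = ds.getLast? := by
  simpa using List.getLast?_append_of_ne_nil [l] hne

theorem proseOut_split (n : ℕ) : ∀ (done : List String), done.length ≤ n → closed done →
    ∀ rest, proseOut (done ++ rest) = proseOut done ++ proseOut rest := by
  induction n with
  | zero =>
    intro done hlen _ rest
    have : done = [] := List.eq_nil_of_length_eq_zero (Nat.le_zero.1 hlen)
    simp [this, proseOut]
  | succ n ih =>
    intro done hlen hc rest
    cases done with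
    | nil => simp [proseOut]
    | cons l ds =>
      by_cases hl : isSpecial l
      · have hcds : closed ds := by
          intro x hx
          cases hds : ds with
          | nil => simp [hds] at hx
          | cons a b =>
            exact hc x (by rw [getLast?_cons_ne_nil l ds (by simp [hds])]; exact hx)
        have hdlen : ds.length ≤ n := by simp at hlen; omega
        simp only [List.cons_append, proseOut, hl, if_pos]
        rw [ih ds hdlen hcds rest]
      · -- l plain; since done is closed and l is plain, ds is nonempty and contains a special line
        have hdsne : ds ≠ [] := by
          rintro rfl
          exact hl (by simpa using hc l (by simp))
        have hcds : closed ds := fun x hx =>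
          hc x (by rw [getLast?_cons_ne_nil l ds hdsne]; exact hx)
        have hsp : ∃ x ∈ ds, isSpecial x = true := closed_getLast_mem ds hdsne hcds
        obtain ⟨htr, hne⟩ := takeRun_special_append ds hsp rest
        have hdecomp := takeRun_decomp ds
        have hclr : closed (takeRun ds).2 := by
          intro x hx
          apply hcds x
          rw [hdecomp, List.getLast?_append_of_ne_nil _ hne]
          exact hx
        have hlenr : (takeRun ds).2.length ≤ n := by
          have := takeRun_rest_length ds
          simp at hlen; omega
        simp only [List.cons_append, proseOut, hl, htr]
        rw [ih _ hlenr hclr rest]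
        simp

-- ===== the main B-side invariant =====
theorem slist_emit (lines : List String) :
    (∀ done buf, closed done → allPlain buf →
        (Slist lines (done ++ buf) false).flatMap emitSeg = proseOut done ++ RR lines buf false)
    ∧ (∀ cur, (Slist lines cur true).flatMap emitSeg = cur ++ RR lines [] true) := by
  induction lines with
  | nil =>
    constructor
    · intro done buf hc hp
      simp [Slist, emitSeg, RR, proseOut_split done.length done (le_refl _) hc,
        proseOut_plain buf hp]
    · intro cur
      simp [Slist, emitSeg, RR, flushList]
  | cons l ls ih =>
    obtain ⟨ihP, ihQ⟩ := ih
    constructor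
    · intro done buf hc hp
      simp only [Slist, RR]
      by_cases hf : isFence l
      · have hq : (Slist ls [] true).flatMap emitSeg = RR ls [] true := by simpa using ihQ []
        simp only [hf, if_pos, List.flatMap_cons, emitSeg]
        simp [proseOut_split done.length done (le_refl _) hc, proseOut_plain buf hp]
        exact hq
      · by_cases hs : isSpecial l
        · have hc' : closed (done ++ buf ++ [l]) := by
            intro x hx
            simp [List.getLast?_append_of_ne_nil _ (l₂ := [l]) (by simp)] at hx
            subst hx; exact hs
          have hstep := ihP (done ++ buf ++ [l]) [] hc' (by intro x hx; simp at hx)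
          simp only [List.append_nil] at hstep
          have h2 : (done ++ buf) ++ [l] = done ++ (buf ++ [l]) := by simp
          simp only [hf, Bool.false_eq_true, ite_false, hs, ite_true, h2]
          rw [← h2, hstep, List.append_assoc done buf [l],
            proseOut_split done.length done (le_refl _) hc,
            proseOut_plain_special buf hp l hs]
          simp [proseOut]
        · have hp' : allPlain (buf ++ [l]) := by
            intro x hx
            rcases List.mem_append.1 hx with hx | hx
            · exact hp x hx
            · simp at hx; subst hx; simpa using hs
          have h2 : (done ++ buf) ++ [l] = done ++ (buf ++ [l]) := by simp
          simp only [hf, hs, Bool.false_eq_true, ite_false]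
          rw [h2, ihP done (buf ++ [l]) hc hp']
    · intro cur
      simp only [Slist, RR]
      by_cases hf : isFence l
      · have hp0 : (Slist ls [] false).flatMap emitSeg = RR ls [] false := by
          simpa [proseOut] using ihP [] [] (by intro x hx; simp at hx) (by intro x hx; simp at hx)
        simp only [hf, if_pos, List.flatMap_cons, emitSeg]
        simp [flushList]
        exact hp0
      · simp [hf, ihQ (cur ++ [l])]

theorem reflow_main (lines : List String) :
    flushA (lines.foldl stepA ([], [], false)).1 (lines.foldl stepA ([], [], false)).2.1
      = ((lines.foldl segsStepB ([], [], false)).1 ++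
          [((lines.foldl segsStepB ([], [], false)).2.2, (lines.foldl segsStepB ([], [], false)).2.1,
            (none : Option String))]).foldl outStepB [] := by
  have ha := foldA_eq lines [] [] false
  simp only [List.nil_append] at ha
  rw [ha, foldOut_eq]
  have hs := foldSegs_eq lines [] [] false
  simp only [List.nil_append] at hs
  rw [hs]
  have hb := (slist_emit lines).1 [] [] (fun x hx => by simp at hx) (fun x hx => by simp at hx)
  simp only [List.nil_append] at hb ⊢
  rw [hb]
  simp [proseOut]

-- ===== VERDICT (by name: the statement is the Claim_ definition above) =====
theorem reflow_spec : Claim_equal_reflow := by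
  intro text _
  show reflow text = reflow_alt text
  unfold reflow reflow_alt
  exact congrArg (fun l => PySem.Str.join "\n" l ++ "\n") (reflow_main (PySem.Str.splitlines text))
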